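-- pv_equiv track=rewrite | github.com/akhil-reddy/cs572 | assignment2/stats.py | process_visit_csv
-- ===== SOURCE A (Python) =====
-- from collections import defaultdict
--
-- def process_visit_csv(visit_data):
--     file_sizes = defaultdict(int)
--     content_types = defaultdict(int)
--     total_urls = 0
--     for row in visit_data[1:]:  # Skip header row
--         size = int(row[1])
--         total_urls += int(row[2])
--         content_types[row[3]] += 1
--         if size < 1024:
--             file_sizes['< 1KB'] += 1
--         elif size < 10240:
--             file_sizes['1KB ~ <10KB'] += 1
--         elif size < 102400:
--             file_sizes['10KB ~ <100KB'] += 1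
--         elif size < 1048576:
--             file_sizes['100KB ~ <1MB'] += 1
--         else:
--             file_sizes['>= 1MB'] += 1
--     return file_sizes, content_types, total_urls
-- ===== SOURCE B (Python) =====
-- from collections import defaultdict, Counter
--
-- def process_visit_csv(visit_data):
--     bounds = [1024, 10240, 102400, 1048576]
--     labels = ['< 1KB', '1KB ~ <10KB', '10KB ~ <100KB', '100KB ~ <1MB', '>= 1MB']
--     rows = visit_data[1:]
--     file_sizes = defaultdict(int, Counter(labels[sum(int(r[1]) >= b for b in bounds)] for r in rows))
--     content_types = defaultdict(int, Counter(r[3] for r in rows))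
--     total_urls = sum(int(r[2]) for r in rows)
--     return file_sizes, content_types, total_urls
-- ===== Notes on version B (the rewrite author's own statement) =====
-- stated objective: idiomatic
-- what changed: Replaces A's single loop with a five-way if/elif chain by a threshold table (label index = count of bounds <= size) and three independent passes: two collections.Counter builds for the size buckets and content types plus a sum() for total_urls.
-- outside the precondition, e.g. on process_visit_csv([['h', 's', 'u', 'c'], ['url', '12']]): A raises IndexError, B raises IndexError
import Mathlib
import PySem

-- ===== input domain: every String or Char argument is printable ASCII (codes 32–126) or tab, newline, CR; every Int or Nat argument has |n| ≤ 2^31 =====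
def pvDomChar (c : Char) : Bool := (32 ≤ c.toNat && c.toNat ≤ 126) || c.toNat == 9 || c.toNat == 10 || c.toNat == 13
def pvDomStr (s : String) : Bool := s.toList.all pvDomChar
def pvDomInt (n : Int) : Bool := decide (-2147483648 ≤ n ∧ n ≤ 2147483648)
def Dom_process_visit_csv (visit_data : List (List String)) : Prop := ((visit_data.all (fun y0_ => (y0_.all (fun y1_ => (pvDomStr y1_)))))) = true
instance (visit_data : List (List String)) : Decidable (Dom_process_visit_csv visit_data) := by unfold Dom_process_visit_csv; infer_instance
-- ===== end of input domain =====

-- B replaces A's five-way if/elif size chain and single accumulating loop by a threshold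
-- table (index = number of bounds ≤ size) and three independent passes (two Counters and a sum). Objective: idiomatic.

-- ===== PORT A =====
-- A's loop state: (file_sizes, content_types, total_urls); one step per data row.
def pvStepA (st : PySem.Dict String Int × PySem.Dict String Int × Int) (row : List String) :
    PySem.Dict String Int × PySem.Dict String Int × Int :=
  let size : Int := (PySem.Int.ofStr? (PySem.List.pyGetD row 1 "")).getD 0
  let tu : Int := st.2.2 + (PySem.Int.ofStr? (PySem.List.pyGetD row 2 "")).getD 0
  let ct := st.2.1.modify (PySem.List.pyGetD row 3 "") 0 (· + 1)
  let fs :=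
    if size < 1024 then st.1.modify "< 1KB" 0 (· + 1)
    else if size < 10240 then st.1.modify "1KB ~ <10KB" 0 (· + 1)
    else if size < 102400 then st.1.modify "10KB ~ <100KB" 0 (· + 1)
    else if size < 1048576 then st.1.modify "100KB ~ <1MB" 0 (· + 1)
    else st.1.modify ">= 1MB" 0 (· + 1)
  (fs, ct, tu)

def process_visit_csv (visit_data : List (List String)) : (List (String × Int)) × (List (String × Int)) × Int :=
  let r := (PySem.List.slice visit_data (some 1) none).foldl pvStepA
              (PySem.Dict.empty, PySem.Dict.empty, 0)
  (r.1.items, r.2.1.items, r.2.2)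

-- ===== PORT B =====
def pvBounds : List Int := [1024, 10240, 102400, 1048576]
def pvLabels : List String := ["< 1KB", "1KB ~ <10KB", "10KB ~ <100KB", "100KB ~ <1MB", ">= 1MB"]

-- labels[sum(int(r[1]) >= b for b in bounds)]
def pvLabelOf (row : List String) : String :=
  let size : Int := (PySem.Int.ofStr? (PySem.List.pyGetD row 1 "")).getD 0
  PySem.List.pyGetD pvLabels
    (pvBounds.foldl (fun acc b => acc + (if size ≥ b then (1 : Int) else 0)) 0) ""

def process_visit_csv_alt (visit_data : List (List String)) : (List (String × Int)) × (List (String × Int)) × Int :=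
  let rows := PySem.List.slice visit_data (some 1) none
  let file_sizes := PySem.Dict.counter (rows.map pvLabelOf)
  let content_types := PySem.Dict.counter (rows.map (fun r => PySem.List.pyGetD r 3 ""))
  let total_urls := rows.foldl (fun a r => a + (PySem.Int.ofStr? (PySem.List.pyGetD r 2 "")).getD 0) (0 : Int)
  (file_sizes.items, content_types.items, total_urls)

-- ===== PRECONDITION & SPEC =====
-- Pre_ excludes exactly the inputs where Python A raises: a data row shorter than 4
-- fields (IndexError) or whose size/outlinks field is not int()-parsable (ValueError).
def Pre_process_visit_csv (visit_data : List (List String)) : Prop :=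
  ∀ row ∈ visit_data.tail, 4 ≤ row.length ∧
    (PySem.Int.ofStr? (PySem.List.pyGetD row 1 "")).isSome = true ∧
    (PySem.Int.ofStr? (PySem.List.pyGetD row 2 "")).isSome = true
instance (visit_data : List (List String)) : Decidable (Pre_process_visit_csv visit_data) := by
  unfold Pre_process_visit_csv; infer_instance

def pvWitness_process_visit_csv : List (List String) :=
  [["url", "size", "outlinks", "type"], ["u1", "500", "2", "text/html"], ["u2", "20000", "3", "text/html"]]

def Spec_process_visit_csv (visit_data : List (List String)) (out : (List (String × Int)) × (List (String × Int)) × Int) : Prop := out = process_visit_csv_alt visit_data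
instance (visit_data : List (List String)) (out : (List (String × Int)) × (List (String × Int)) × Int) : Decidable (Spec_process_visit_csv visit_data out) := by unfold Spec_process_visit_csv; infer_instance

-- ===== CLAIM (what is proved, stated in full; the proofs are below) =====
def Claim_equal_process_visit_csv : Prop := ∀ (visit_data : List (List String)), Dom_process_visit_csv visit_data → Pre_process_visit_csv visit_data → Spec_process_visit_csv visit_data (process_visit_csv visit_data)

-- ===== LEMMAS AND PROOFS =====

-- B's index (count of bounds ≤ size) selects exactly A's if/elif label.
theorem pvIndex_label (size : Int) :
    PySem.List.pyGetD pvLabels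
        (pvBounds.foldl (fun acc b => acc + (if size ≥ b then (1 : Int) else 0)) 0) "" =
      (if size < 1024 then "< 1KB"
       else if size < 10240 then "1KB ~ <10KB"
       else if size < 102400 then "10KB ~ <100KB"
       else if size < 1048576 then "100KB ~ <1MB"
       else ">= 1MB") := by
  simp only [pvBounds, pvLabels, List.foldl]
  by_cases h1 : size < 1024
  · rw [if_pos h1, if_neg (show ¬ size ≥ 1024 by omega), if_neg (show ¬ size ≥ 10240 by omega),
        if_neg (show ¬ size ≥ 102400 by omega), if_neg (show ¬ size ≥ 1048576 by omega)]
    decide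
  by_cases h2 : size < 10240
  · rw [if_neg h1, if_pos h2, if_pos (show size ≥ 1024 by omega), if_neg (show ¬ size ≥ 10240 by omega),
        if_neg (show ¬ size ≥ 102400 by omega), if_neg (show ¬ size ≥ 1048576 by omega)]
    decide
  by_cases h3 : size < 102400
  · rw [if_neg h1, if_neg h2, if_pos h3, if_pos (show size ≥ 1024 by omega), if_pos (show size ≥ 10240 by omega),
        if_neg (show ¬ size ≥ 102400 by omega), if_neg (show ¬ size ≥ 1048576 by omega)]
    decide
  by_cases h4 : size < 1048576
  · rw [if_neg h1, if_neg h2, if_neg h3, if_pos h4, if_pos (show size ≥ 1024 by omega),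
        if_pos (show size ≥ 10240 by omega), if_pos (show size ≥ 102400 by omega),
        if_neg (show ¬ size ≥ 1048576 by omega)]
    decide
  · rw [if_neg h1, if_neg h2, if_neg h3, if_neg h4, if_pos (show size ≥ 1024 by omega),
        if_pos (show size ≥ 10240 by omega), if_pos (show size ≥ 102400 by omega),
        if_pos (show size ≥ 1048576 by omega)]
    decide

-- A's if/elif chain updates file_sizes exactly at B's table-derived label.
theorem pvStepA_fs (fs : PySem.Dict String Int) (row : List String) :
    (if ((PySem.Int.ofStr? (PySem.List.pyGetD row 1 "")).getD 0) < 1024 then fs.modify "< 1KB" 0 (· + 1)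
     else if ((PySem.Int.ofStr? (PySem.List.pyGetD row 1 "")).getD 0) < 10240 then fs.modify "1KB ~ <10KB" 0 (· + 1)
     else if ((PySem.Int.ofStr? (PySem.List.pyGetD row 1 "")).getD 0) < 102400 then fs.modify "10KB ~ <100KB" 0 (· + 1)
     else if ((PySem.Int.ofStr? (PySem.List.pyGetD row 1 "")).getD 0) < 1048576 then fs.modify "100KB ~ <1MB" 0 (· + 1)
     else fs.modify ">= 1MB" 0 (· + 1)) = fs.modify (pvLabelOf row) 0 (· + 1) := by
  simp only [pvLabelOf]
  rw [pvIndex_label]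
  split_ifs <;> rfl

-- The main loop invariant: A's fold splits into three independent folds.
theorem pvFoldA_split (rows : List (List String)) (fs ct : PySem.Dict String Int) (tu : Int) :
    rows.foldl pvStepA (fs, ct, tu) =
      (rows.foldl (fun d r => d.modify (pvLabelOf r) 0 (· + 1)) fs,
       rows.foldl (fun d r => d.modify (PySem.List.pyGetD r 3 "") 0 (· + 1)) ct,
       rows.foldl (fun a r => a + (PySem.Int.ofStr? (PySem.List.pyGetD r 2 "")).getD 0) tu) := by
  induction rows generalizing fs ct tu with
  | nil => rfl
  | cons row rest ih =>
      simp only [List.foldl]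
      rw [show pvStepA (fs, ct, tu) row =
          (fs.modify (pvLabelOf row) 0 (· + 1),
           ct.modify (PySem.List.pyGetD row 3 "") 0 (· + 1),
           tu + (PySem.Int.ofStr? (PySem.List.pyGetD row 2 "")).getD 0) from by
        unfold pvStepA; rw [← pvStepA_fs fs row]]
      exact ih _ _ _

-- ===== VERDICT (by name: the statement is the Claim_ definition above) =====
theorem process_visit_csv_spec : Claim_equal_process_visit_csv := by
  intro vd _ _
  unfold Spec_process_visit_csv process_visit_csv process_visit_csv_alt
  rw [pvFoldA_split]
  simp only [PySem.Dict.counter_eq_foldl, List.foldl_map]
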